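-- pv_equiv track=rewrite | github.com/Sovender88/junior_tasks | task_1/task_1.py | circular_path
-- ===== SOURCE A (Python) =====
-- def circular_path(n: int, m: int) -> list[int]:
--     circular_array = list(range(1, n + 1))
--     path = []
--     current_index = 0
--
--     while True:
--         path.append(circular_array[current_index])
--         if len(path) > 1 and path[0] == path[-1]:
--             break
--         current_index = (current_index + m - 1) % n
--
--     return path[:-1]
-- ===== SOURCE B (Python) =====
-- def circular_path(n: int, m: int) -> list[int]:
--     # Closed form: the jump size is d = (m-1) % n; the walk returns to the
--     # start after exactly n // gcd(n, d) steps, so emit that many values directly.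
--     d = (m - 1) % n
--     a, b = n, d
--     while b:
--         a, b = b, a % b
--     return [1 + (k * d) % n for k in range(n // a)]
-- ===== Notes on version B (the rewrite author's own statement) =====
-- stated objective: faster
-- what changed: Replaces the indefinite simulate-until-back-at-start while-loop with a closed form: jump size d = (m-1) % n, cycle length L = n // gcd(n, d), then one direct comprehension [1 + (k*d) % n for k in range(L)].
import Mathlib
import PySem

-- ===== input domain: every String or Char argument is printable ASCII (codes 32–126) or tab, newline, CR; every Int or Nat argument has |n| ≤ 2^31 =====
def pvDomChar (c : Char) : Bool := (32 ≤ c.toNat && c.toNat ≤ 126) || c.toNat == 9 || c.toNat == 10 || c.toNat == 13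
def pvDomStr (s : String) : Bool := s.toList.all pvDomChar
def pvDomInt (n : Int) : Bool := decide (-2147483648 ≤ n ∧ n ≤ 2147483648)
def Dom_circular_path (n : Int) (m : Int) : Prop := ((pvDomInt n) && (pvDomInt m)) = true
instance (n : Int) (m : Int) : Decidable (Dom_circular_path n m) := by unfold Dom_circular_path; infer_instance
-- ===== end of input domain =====

-- B replaces A's simulate-until-the-walk-returns while-loop by the closed form
-- d = (m-1) % n, cycle length L = n // gcd(n, d), and one direct generation pass.

-- ===== PORT A =====
-- A's 'while True' loop; the fuel argument only makes it total (the loop provably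
-- breaks within n+1 appends on every input Pre_ admits; 'none' is A's IndexError).
def circularLoopA (arr : List Int) (n : Int) (m : Int) : Nat → List Int → Int → Option (List Int)
  | 0, _, _ => none
  | fuel+1, path, current_index =>
    match PySem.List.pyGet? arr current_index with
    | none => none   -- IndexError: circular_array[current_index]
    | some v =>
      let path' := path ++ [v]
      if 1 < path'.length ∧ PySem.List.pyGet? path' 0 = PySem.List.pyGet? path' (-1)
      then some path'
      else circularLoopA arr n m fuel path' (PySem.Int.mod (current_index + m - 1) n)

def circular_path (n : Int) (m : Int) : List Int :=
  let circular_array := PySem.List.pyRange 1 (n + 1) 1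
  match circularLoopA circular_array n m (n.toNat + 2) [] 0 with
  | none => []          -- unreachable under Pre_ (outside it A raises)
  | some path => PySem.List.slice path none (some (-1))   -- path[:-1]

-- ===== PORT B =====
-- Source B's hand-written Euclid loop 'while b: a, b = b, a % b'; fuel only for totality.
def gcdLoopB : Nat → Int → Int → Int
  | 0, a, _ => a
  | fuel+1, a, b => if b ≠ 0 then gcdLoopB fuel b (PySem.Int.mod a b) else a

def circular_path_alt (n : Int) (m : Int) : List Int :=
  let d := PySem.Int.mod (m - 1) n
  let a := gcdLoopB (d.toNat + 1) n d
  (PySem.List.pyRange 0 (PySem.Int.floordiv n a) 1).map (fun k => 1 + PySem.Int.mod (k * d) n)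

-- ===== PRECONDITION & SPEC =====
-- Pre_ excludes exactly n ≤ 0: there A's circular_array is empty and circular_array[0] raises IndexError.
def Pre_circular_path (n : Int) (m : Int) : Prop := 1 ≤ n
instance (n : Int) (m : Int) : Decidable (Pre_circular_path n m) := by unfold Pre_circular_path; infer_instance
def pvWitness_circular_path : Int × Int := (5, 3)

def Spec_circular_path (n : Int) (m : Int) (out : List Int) : Prop := out = circular_path_alt n m
instance (n : Int) (m : Int) (out : List Int) : Decidable (Spec_circular_path n m out) := by unfold Spec_circular_path; infer_instance

-- ===== CLAIM (what is proved, stated in full; the proofs are below) =====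
def Claim_equal_circular_path : Prop := ∀ (n : Int) (m : Int), Dom_circular_path n m → Pre_circular_path n m → Spec_circular_path n m (circular_path n m)

-- ===== LEMMAS AND PROOFS =====

-- abbreviations for the proof: jump size D, cycle length L, the k-th emitted value pvF
def pvD (n m : Int) : Nat := (PySem.Int.mod (m - 1) n).toNat
def pvL (n m : Int) : Nat := n.toNat / Nat.gcd n.toNat (pvD n m)
def pvF (n m : Int) (k : Nat) : Int := 1 + ((k * pvD n m % n.toNat : Nat) : Int)

lemma gcdLoopB_eq : ∀ (fuel a b : Nat), b < fuel → gcdLoopB fuel (a : Int) (b : Int) = (Nat.gcd a b : Int) := by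
  intro fuel
  induction fuel with
  | zero => intro a b h; omega
  | succ fuel ih =>
    intro a b h
    by_cases hb : b = 0
    · subst hb; simp [gcdLoopB]
    · have hb' : (b : Int) ≠ 0 := by exact_mod_cast hb
      simp only [gcdLoopB, if_pos hb', PySem.Int.mod_natCast]
      rw [ih b (a % b) (by have := Nat.mod_lt a (Nat.pos_of_ne_zero hb); omega)]
      rw [Nat.gcd_comm b (a % b), ← Nat.gcd_rec b a, Nat.gcd_comm b a]

lemma pvD_lt (n m : Int) (hn : 1 ≤ n) : pvD n m < n.toNat := by
  have h := PySem.Int.mod_lt (m - 1) (b := n) (by omega)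
  have h0 := PySem.Int.mod_nonneg (m - 1) (b := n) (by omega)
  unfold pvD; omega

lemma pvD_cast (n m : Int) (hn : 1 ≤ n) : ((pvD n m : Nat) : Int) = PySem.Int.mod (m - 1) n := by
  have h0 := PySem.Int.mod_nonneg (m - 1) (b := n) (by omega)
  unfold pvD; omega

lemma pvL_pos (n m : Int) (hn : 1 ≤ n) : 1 ≤ pvL n m := by
  have hN : 0 < n.toNat := by omega
  exact Nat.div_pos (Nat.gcd_le_left _ hN) (Nat.gcd_pos_of_pos_left _ hN)

lemma pvL_le (n m : Int) (hn : 1 ≤ n) : pvL n m ≤ n.toNat := by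
  exact Nat.div_le_self _ _

-- the number-theoretic core: the walk is back at the start after j steps iff L ∣ j
lemma dvd_mul_iff_pvL_dvd (n m : Int) (hn : 1 ≤ n) (j : Nat) :
    n.toNat ∣ j * pvD n m ↔ pvL n m ∣ j := by
  have hN : 0 < n.toNat := by omega
  have hgpos : 0 < Nat.gcd n.toNat (pvD n m) := Nat.gcd_pos_of_pos_left _ hN
  obtain ⟨l, hl⟩ := Nat.gcd_dvd_left n.toNat (pvD n m)
  obtain ⟨k, hk⟩ := Nat.gcd_dvd_right n.toNat (pvD n m)
  set g := Nat.gcd n.toNat (pvD n m) with hg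
  have hco : Nat.Coprime (n.toNat / g) (pvD n m / g) := Nat.coprime_div_gcd_div_gcd hgpos
  have hNg : n.toNat / g = l := by rw [hl]; exact Nat.mul_div_cancel_left l hgpos
  have hDg : pvD n m / g = k := by rw [hk]; exact Nat.mul_div_cancel_left k hgpos
  rw [hNg, hDg] at hco
  unfold pvL
  rw [← hg, hNg, hl, hk]
  constructor
  · intro h
    have h' : g * l ∣ g * (j * k) := by
      have e : j * (g * k) = g * (j * k) := by ring
      rwa [e] at h
    exact hco.dvd_of_dvd_mul_right ((Nat.mul_dvd_mul_iff_left hgpos).mp h')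
  · rintro ⟨c, rfl⟩
    exact ⟨c * k, by ring⟩

lemma arr_get (n : Int) (hn : 1 ≤ n) (i : Nat) (hi : i < n.toNat) :
    PySem.List.pyGet? (PySem.List.pyRange 1 (n + 1) 1) ((i : Nat) : Int) = some (1 + (i : Int)) := by
  rw [PySem.List.pyGet?_natCast]
  have hlen : (PySem.List.pyRange 1 (n + 1) 1).length = n.toNat := by
    rw [PySem.List.length_pyRange_one]; omega
  have hi' : i < (PySem.List.pyRange 1 (n + 1) 1).length := by omega
  rw [List.getElem?_eq_getElem hi', PySem.List.getElem_pyRange_one]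

-- the index update: ((j·D mod N) + m - 1) mod n = ((j+1)·D) mod N
lemma idx_step (n m : Int) (hn : 1 ≤ n) (j : Nat) :
    PySem.Int.mod (((j * pvD n m % n.toNat : Nat) : Int) + m - 1) n
      = (((j + 1) * pvD n m % n.toNat : Nat) : Int) := by
  have hnpos : (0 : Int) < n := by omega
  have hDlt := pvD_lt n m hn
  have hNn : ((n.toNat : Nat) : Int) = n := by omega
  have hDz0 : (0 : Int) ≤ ((pvD n m : Nat) : Int) := by positivity
  have hDzlt : ((pvD n m : Nat) : Int) < n := by omega
  have hDe : ((pvD n m : Nat) : Int) = (m - 1) % n := by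
    rw [pvD_cast n m hn, PySem.Int.mod_eq_emod_of_pos hnpos]
  rw [PySem.Int.mod_eq_emod_of_pos hnpos]
  push_cast
  rw [hNn]
  have h1 : Int.ModEq n ((j : Int) * ((pvD n m : Nat) : Int) % n) ((j : Int) * ((pvD n m : Nat) : Int)) :=
    Int.emod_emod_of_dvd _ dvd_rfl
  have h2 : Int.ModEq n (m - 1) ((pvD n m : Nat) : Int) := by
    show (m - 1) % n = ((pvD n m : Nat) : Int) % n
    rw [← hDe, Int.emod_eq_of_lt hDz0 hDzlt]
  have h3 := h1.add h2
  calc ((j : Int) * ((pvD n m : Nat) : Int) % n + m - 1) % n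
      = ((j : Int) * ((pvD n m : Nat) : Int) % n + (m - 1)) % n := by ring_nf
    _ = ((j : Int) * ((pvD n m : Nat) : Int) + ((pvD n m : Nat) : Int)) % n := h3
    _ = (((j : Int) + 1) * ((pvD n m : Nat) : Int)) % n := by ring_nf

-- A's loop, from the state reached after j ≥ 1 appends, runs to the break and
-- returns the first L+1 values of the walk.
lemma loopA_run (n m : Int) (hn : 1 ≤ n) : ∀ (fuel j : Nat), 1 ≤ j → j ≤ pvL n m →
    pvL n m + 1 - j ≤ fuel →
    circularLoopA (PySem.List.pyRange 1 (n + 1) 1) n m fuel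
      ((List.range j).map (pvF n m)) ((j * pvD n m % n.toNat : Nat) : Int)
      = some ((List.range (pvL n m + 1)).map (pvF n m)) := by
  intro fuel
  induction fuel with
  | zero => intro j h1 h2 h3; omega
  | succ fuel ih =>
    intro j h1 h2 h3
    have hN : 0 < n.toNat := by omega
    have hidx : j * pvD n m % n.toNat < n.toNat := Nat.mod_lt _ hN
    have hval : (1 : Int) + ((j * pvD n m % n.toNat : Nat) : Int) = pvF n m j := rfl
    have hpath : (List.range j).map (pvF n m) ++ [pvF n m j]
        = (List.range (j + 1)).map (pvF n m) := by
      rw [List.range_succ, List.map_append, List.map_singleton]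
    have hget0 : PySem.List.pyGet? ((List.range j).map (pvF n m) ++ [pvF n m j]) 0
        = some (pvF n m 0) := by
      rw [hpath, PySem.List.pyGet?_zero, List.getElem?_map]
      rw [List.getElem?_range (by omega : 0 < j + 1)]
      rfl
    have hgetl : PySem.List.pyGet? ((List.range j).map (pvF n m) ++ [pvF n m j]) (-1)
        = some (pvF n m j) := PySem.List.pyGet?_neg_one_append_singleton _ _
    have hlen : ((List.range j).map (pvF n m) ++ [pvF n m j]).length = j + 1 := by
      simp
    have hcond : (pvF n m 0 = pvF n m j) ↔ pvL n m ∣ j := by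
      unfold pvF
      rw [Nat.zero_mul, Nat.zero_mod, Nat.cast_zero]
      constructor
      · intro h
        have h0 : j * pvD n m % n.toNat = 0 := by omega
        exact (dvd_mul_iff_pvL_dvd n m hn j).mp (Nat.dvd_of_mod_eq_zero h0)
      · intro h
        have h0 : n.toNat ∣ j * pvD n m := (dvd_mul_iff_pvL_dvd n m hn j).mpr h
        rw [Nat.mod_eq_zero_of_dvd h0]
        norm_num
    simp only [circularLoopA, arr_get n hn _ hidx, hval, hget0, hgetl, hlen]
    by_cases hjL : j = pvL n m
    · subst hjL
      rw [if_pos ⟨by omega, congrArg some (hcond.mpr dvd_rfl)⟩, hpath]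
    · have hjlt : j < pvL n m := by omega
      have hnd : ¬ pvL n m ∣ j := by
        intro hd
        have := Nat.le_of_dvd (by omega) hd
        omega
      have hcF : ¬ (1 < j + 1 ∧ some (pvF n m 0) = some (pvF n m j)) := by
        rintro ⟨-, heq⟩
        exact hnd (hcond.mp (Option.some.inj heq))
      rw [if_neg hcF, hpath, idx_step n m hn j]
      exact ih (j + 1) (by omega) (by omega) (by omega)

-- ===== VERDICT (by name: the statement is the Claim_ definition above) =====
theorem circular_path_spec : Claim_equal_circular_path := by
  unfold Claim_equal_circular_path Spec_circular_path Pre_circular_path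
  intro n m _ hn
  obtain ⟨N, rfl⟩ : ∃ N : Nat, n = (N : Int) := ⟨n.toNat, by omega⟩
  have hN : 0 < N := by exact_mod_cast hn
  have hDlt := pvD_lt (N : Int) m hn
  rw [Int.toNat_natCast] at hDlt
  -- B computes the walk in closed form
  have hB : circular_path_alt (N : Int) m = (List.range (pvL (N : Int) m)).map (pvF (N : Int) m) := by
    simp only [circular_path_alt]
    rw [← pvD_cast (N : Int) m hn, Int.toNat_natCast,
        gcdLoopB_eq _ _ _ (Nat.lt_succ_self _), PySem.Int.floordiv_natCast,
        PySem.List.pyRange_zero_natCast, List.map_map]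
    have hL : N / Nat.gcd N (pvD (N : Int) m) = pvL (N : Int) m := by
      unfold pvL; rw [Int.toNat_natCast]
    rw [hL]
    apply List.map_congr_left
    intro k _
    show 1 + PySem.Int.mod ((k : Int) * ((pvD (N : Int) m : Nat) : Int)) ((N : Nat) : Int)
        = pvF (N : Int) m k
    rw [← Nat.cast_mul, PySem.Int.mod_natCast]
    unfold pvF
    rw [Int.toNat_natCast]
  -- A's loop produces the same walk plus the repeated start, then drops it
  have step1 : circularLoopA (PySem.List.pyRange 1 ((N : Int) + 1) 1) (N : Int) m (((N : Int)).toNat + 2) [] 0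
      = some ((List.range (pvL (N : Int) m + 1)).map (pvF (N : Int) m)) := by
    have hg0 : PySem.List.pyGet? (PySem.List.pyRange 1 ((N : Int) + 1) 1) 0 = some 1 := by
      have := arr_get (N : Int) hn 0 (by rw [Int.toNat_natCast]; omega)
      simpa using this
    rw [Int.toNat_natCast, show N + 2 = (N + 1) + 1 from rfl]
    simp only [circularLoopA, hg0, List.nil_append, List.length_cons, List.length_nil,
      lt_self_iff_false, false_and, if_false]
    have hmod : PySem.Int.mod (0 + m - 1) (N : Int)
        = ((1 * pvD (N : Int) m % ((N : Int)).toNat : Nat) : Int) := by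
      rw [Nat.one_mul, Int.toNat_natCast, Nat.mod_eq_of_lt hDlt, pvD_cast (N : Int) m hn]
      ring_nf
    rw [hmod, show [(1 : Int)] = (List.range 1).map (pvF (N : Int) m) from by simp [pvF]]
    have := loopA_run (N : Int) m hn (N + 1) 1 le_rfl (pvL_pos (N : Int) m hn)
      (by have := pvL_le (N : Int) m hn; rw [Int.toNat_natCast] at this; omega)
    rw [Int.toNat_natCast] at this
    exact this
  simp only [circular_path, step1, PySem.List.slice_to_neg_one]
  rw [List.range_succ, List.map_append, List.map_singleton, List.dropLast_concat, hB]
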